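-- pv_equiv track=rewrite | github.com/hanwool77/codingtest | 프로그래머스/unrated/135808. 과일 장수/과일 장수.py | solution
-- ===== SOURCE A (Python) =====
-- def solution(k, m, score):
--     ans = 0
--     score.sort(reverse = True)
--     i = m - 1
--     while i < len(score):
--         ans += m * score[i]
--         i += m
--     return ans
-- ===== SOURCE B (Python) =====
-- def solution(k, m, score):
--     score.sort(reverse=True)
--     ans = 0
--     n = len(score)
--     j = 0
--     while j < n:
--         v = score[j]
--         r = j + 1
--         while r < n and score[r] == v:
--             r += 1
--         # indices i in [j, r) hold value v; the selected (box-minimum) indices are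
--         # exactly those with (i+1) % m == 0, and there are r//m - j//m of them
--         ans += m * v * (r // m - j // m)
--         j = r
--     return ans
-- ===== Notes on version B (the rewrite author's own statement) =====
-- stated objective: alternative
-- what changed: B replaces A's stride over the m-th, 2m-th, ... positions by a run-length pass over the descending-sorted list: it scans maximal runs of equal values and, for each run [j, r), adds m * value * (r//m - j//m), counting by floor division how many box-minimum positions fall inside the run instead of visiting them one by one.
import Mathlib
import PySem

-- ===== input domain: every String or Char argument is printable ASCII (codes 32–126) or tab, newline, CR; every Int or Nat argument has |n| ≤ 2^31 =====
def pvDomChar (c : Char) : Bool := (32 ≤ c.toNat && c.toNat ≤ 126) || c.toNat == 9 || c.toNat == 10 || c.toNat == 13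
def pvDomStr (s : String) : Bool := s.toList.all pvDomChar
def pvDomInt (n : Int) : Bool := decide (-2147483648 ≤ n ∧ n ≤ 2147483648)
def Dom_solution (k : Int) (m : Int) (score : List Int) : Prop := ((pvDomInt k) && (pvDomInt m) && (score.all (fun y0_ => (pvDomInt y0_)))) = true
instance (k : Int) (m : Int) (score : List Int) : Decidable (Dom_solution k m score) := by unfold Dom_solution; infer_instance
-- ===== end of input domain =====

-- B replaces A's stride over box-minimum positions by a run-length pass over the sorted
-- list, counting the selected positions inside each run by floor division (alternative
-- decomposition, same cost); both sort `score` in place (same mutation), and the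
-- equivalence proved is about the return value.

-- ===== PORT A =====
-- the while loop: i steps by m while i < len(score); fuel = score.length + 1 bounds the
-- iteration count inside Pre_ (each step advances i by m ≥ 1); score[i] is pyGet?
-- (getD 0 is unreachable inside Pre_, where 0 ≤ i < len at every access)
def solutionLoopA (s : List Int) (m : Int) : Nat → Int → Int → Int
  | 0, _, ans => ans
  | fuel + 1, i, ans =>
      if i < (s.length : Int) then
        solutionLoopA s m fuel (i + m) (ans + m * (PySem.List.pyGet? s i).getD 0)
      else ans

def solution (k : Int) (m : Int) (score : List Int) : Int :=
  let s := PySem.List.sorted score (fun x => x) true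
  solutionLoopA s m (s.length + 1) (m - 1) 0

-- ===== PORT B =====
-- inner while of Source B: r += 1 while r < n and score[r] == v; fuel = score.length bounds it
-- (r starts at j+1 ≤ n and increases while r < n)
def runEndB (s : List Int) (v : Int) : Nat → Int → Int
  | 0, r => r
  | fuel + 1, r =>
      if r < (s.length : Int) ∧ (PySem.List.pyGet? s r).getD 0 = v then
        runEndB s v fuel (r + 1)
      else r

-- outer while of Source B: j jumps to the end r of the current run (j < r, so
-- fuel = score.length + 1 bounds the iterations); // is PySem.Int.floordiv
def solutionLoopB (s : List Int) (m : Int) : Nat → Int → Int → Int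
  | 0, _, ans => ans
  | fuel + 1, j, ans =>
      if j < (s.length : Int) then
        let v := (PySem.List.pyGet? s j).getD 0
        let r := runEndB s v s.length (j + 1)
        solutionLoopB s m fuel r
          (ans + m * v * (PySem.Int.floordiv r m - PySem.Int.floordiv j m))
      else ans

def solution_alt (k : Int) (m : Int) (score : List Int) : Int :=
  let s := PySem.List.sorted score (fun x => x) true
  solutionLoopB s m (s.length + 1) 0 0

-- ===== PRECONDITION & SPEC =====
-- Pre_ excludes only m ≤ 0, where Python A never returns: the loop guard i < len(score)
-- then never becomes false, so A raises IndexError (the negative index i eventually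
-- passes the front of the list; immediately on an empty list) or, for m = 0 on a
-- nonempty list, loops forever.
def Pre_solution (k : Int) (m : Int) (score : List Int) : Prop := 1 ≤ m
instance (k : Int) (m : Int) (score : List Int) : Decidable (Pre_solution k m score) := by unfold Pre_solution; infer_instance
def pvWitness_solution : Int × Int × List Int := (4, 3, [4, 1, 2, 3, 1, 2, 3, 1])

def Spec_solution (k : Int) (m : Int) (score : List Int) (out : Int) : Prop := out = solution_alt k m score
instance (k : Int) (m : Int) (score : List Int) (out : Int) : Decidable (Spec_solution k m score out) := by unfold Spec_solution; infer_instance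

-- ===== CLAIM (what is proved, stated in full; the proofs are below) =====
def Claim_equal_solution : Prop := ∀ (k : Int) (m : Int) (score : List Int), Dom_solution k m score → Pre_solution k m score → Spec_solution k m score (solution k m score)

-- ===== LEMMAS AND PROOFS =====

-- the canonical value both loops compute: over positions i in [j, n), the boxes'
-- minimum positions are exactly those with mn ∣ i + 1, each contributing mn * s[i]
def selSum (s : List Int) (mn : Nat) (j : Nat) : Int :=
  ∑ i ∈ Finset.Ico j s.length, (if mn ∣ (i + 1) then (mn : Int) * (s[i]?.getD 0) else 0)

lemma selSum_empty (s : List Int) (mn : Nat) (j : Nat) (h : s.length ≤ j) :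
    selSum s mn j = 0 := by
  unfold selSum
  rw [Finset.Ico_eq_empty (by simpa using h)]
  rfl

-- positions strictly between two consecutive selected positions contribute 0
lemma not_dvd_between (mn j i : Nat) (hdvd : mn ∣ j + 1) (h1 : j < i) (h2 : i < j + mn) :
    ¬ mn ∣ i + 1 := by
  intro hi
  obtain ⟨a, ha⟩ := hdvd
  obtain ⟨b, hb⟩ := hi
  have hde : mn * a < mn * b := by omega
  have hab : a < b := lt_of_mul_lt_mul_left hde (Nat.zero_le mn)
  have hde2 : mn * b < mn * (a + 1) := by rw [Nat.mul_succ]; omega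
  have hba : b < a + 1 := lt_of_mul_lt_mul_left hde2 (Nat.zero_le mn)
  omega

-- one stride step of A's loop: the sum over [j, j+mn) collapses to its first term
lemma selSum_step (s : List Int) (mn : Nat) (hm : 1 ≤ mn) (j : Nat)
    (hdvd : mn ∣ j + 1) (hj : j < s.length) :
    selSum s mn j = (mn : Int) * (s[j]?.getD 0) + selSum s mn (j + mn) := by
  have hmid : j ≤ min (j + mn) s.length := by omega
  have hmid2 : min (j + mn) s.length ≤ s.length := by omega
  unfold selSum
  rw [← Finset.sum_Ico_consecutive _ hmid hmid2]
  have hrest : (∑ i ∈ Finset.Ico (min (j + mn) s.length) s.length,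
      (if mn ∣ (i + 1) then (mn : Int) * (s[i]?.getD 0) else 0))
      = ∑ i ∈ Finset.Ico (j + mn) s.length,
      (if mn ∣ (i + 1) then (mn : Int) * (s[i]?.getD 0) else 0) := by
    rcases Nat.lt_or_ge s.length (j + mn) with h | h
    · rw [min_eq_right (Nat.le_of_lt h), Finset.Ico_self,
        Finset.Ico_eq_empty (by omega)]
    · rw [min_eq_left h]
  rw [hrest]
  congr 1
  have hjmem : j ∈ Finset.Ico j (min (j + mn) s.length) := by
    simp only [Finset.mem_Ico]
    omega
  rw [Finset.sum_eq_single_of_mem j hjmem]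
  · rw [if_pos hdvd]
  · intro i hi hne
    simp only [Finset.mem_Ico] at hi
    rw [if_neg (not_dvd_between mn j i hdvd (by omega) (by omega))]

-- A's loop computes selSum from its current (always selected) position
lemma loopA_eq (s : List Int) (mn : Nat) (hm : 1 ≤ mn) :
    ∀ (fuel j : Nat) (ans : Int), mn ∣ j + 1 → s.length ≤ fuel + j →
      solutionLoopA s (mn : Int) fuel (j : Int) ans = ans + selSum s mn j := by
  intro fuel
  induction fuel with
  | zero =>
      intro j ans _ hfj
      rw [selSum_empty s mn j (by omega)]
      simp [solutionLoopA]
  | succ fuel ih =>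
      intro j ans hdvd hfj
      by_cases hc : j < s.length
      · rw [solutionLoopA, if_pos (by exact_mod_cast hc)]
        have harg : (j : Int) + (mn : Int) = ((j + mn : Nat) : Int) := by push_cast; ring
        rw [PySem.List.pyGet?_natCast, harg,
          ih (j + mn) _ (by
            obtain ⟨a, ha⟩ := hdvd
            exact ⟨a + 1, by rw [Nat.mul_succ]; omega⟩) (by omega),
          selSum_step s mn hm j hdvd hc]
        ring
      · rw [solutionLoopA, if_neg (by exact_mod_cast hc), selSum_empty s mn j (by omega)]
        ring
-- (above, `PySem.List.pyGet?_natCast : pyGet? s (↑j) = s[j]?` rewrites A's indexing)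

-- the sum over one constant run equals mn * v * (count of selected positions in it),
-- the count expressed by floor divisions of the endpoints
lemma run_sum (mn : Nat) (s : List Int) (v : Int) (j : Nat) :
    ∀ d : Nat, (∀ i, j ≤ i → i < j + d → s[i]?.getD 0 = v) →
      (∑ i ∈ Finset.Ico j (j + d), (if mn ∣ (i + 1) then (mn : Int) * (s[i]?.getD 0) else 0))
        = (mn : Int) * v * ((((j + d) / mn : Nat) : Int) - ((j / mn : Nat) : Int)) := by
  intro d
  induction d with
  | zero => simp
  | succ d ih =>
      intro hconst
      have hd : j + (d + 1) = (j + d) + 1 := by omega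
      rw [hd, Finset.sum_Ico_succ_top (by omega),
        ih (fun i h1 h2 => hconst i h1 (by omega)),
        hconst (j + d) (by omega) (by omega),
        Nat.succ_div]
      by_cases hdvd : mn ∣ (j + d) + 1
      · rw [if_pos hdvd, if_pos hdvd]
        push_cast
        ring
      · rw [if_neg hdvd, if_neg hdvd]
        push_cast
        ring

-- Source B's inner while: it returns the first index r ≥ j+1 that leaves the run of v
lemma runEndB_spec (s : List Int) (v : Int) :
    ∀ (fuel r : Nat), r ≤ s.length → s.length ≤ fuel + r →
      ∃ rn : Nat, runEndB s v fuel (r : Int) = (rn : Int) ∧ r ≤ rn ∧ rn ≤ s.length ∧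
        (∀ i, r ≤ i → i < rn → s[i]?.getD 0 = v) := by
  intro fuel
  induction fuel with
  | zero =>
      intro r hr hfr
      exact ⟨r, by simp [runEndB], le_refl r, hr, fun i h1 h2 => absurd h2 (by omega)⟩
  | succ fuel ih =>
      intro r hr hfr
      have hcond : ((r : Int) < (s.length : Int) ∧ (PySem.List.pyGet? s (r : Int)).getD 0 = v)
          ↔ (r < s.length ∧ s[r]?.getD 0 = v) := by
        rw [PySem.List.pyGet?_natCast]
        constructor
        · exact fun h => ⟨by exact_mod_cast h.1, h.2⟩
        · exact fun h => ⟨by exact_mod_cast h.1, h.2⟩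
      by_cases hc : r < s.length ∧ s[r]?.getD 0 = v
      · have harg : (r : Int) + 1 = ((r + 1 : Nat) : Int) := by push_cast; ring
        rw [runEndB, if_pos (hcond.mpr hc), harg]
        obtain ⟨rn, heq, h1, h2, h3⟩ := ih (r + 1) (by omega) (by omega)
        refine ⟨rn, heq, by omega, h2, fun i hi1 hi2 => ?_⟩
        rcases Nat.eq_or_lt_of_le hi1 with hEq | hLt
        · rw [← hEq]; exact hc.2
        · exact h3 i hLt hi2
      · rw [runEndB, if_neg (fun hcon => hc (hcond.mp hcon))]
        exact ⟨r, rfl, le_refl r, hr, fun i h1 h2 => absurd h2 (by omega)⟩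

-- B's outer loop computes selSum from its current run start
lemma loopB_eq (s : List Int) (mn : Nat) (hm : 1 ≤ mn) :
    ∀ (fuel j : Nat) (ans : Int), s.length ≤ fuel + j →
      solutionLoopB s (mn : Int) fuel (j : Int) ans = ans + selSum s mn j := by
  intro fuel
  induction fuel with
  | zero =>
      intro j ans hfj
      rw [selSum_empty s mn j (by omega)]
      simp [solutionLoopB]
  | succ fuel ih =>
      intro j ans hfj
      by_cases hc : j < s.length
      · rw [solutionLoopB, if_pos (by exact_mod_cast hc)]
        simp only [PySem.List.pyGet?_natCast]
        set v := s[j]?.getD 0 with hv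
        have hjlt : (j : Int) + 1 = ((j + 1 : Nat) : Int) := by push_cast; ring
        rw [hjlt]
        obtain ⟨rn, heq, h1, h2, h3⟩ := runEndB_spec s v s.length (j + 1) (by omega) (by omega)
        rw [heq, PySem.Int.floordiv_natCast, PySem.Int.floordiv_natCast,
          ih rn _ (by omega)]
        have hrun : (∑ i ∈ Finset.Ico j rn, (if mn ∣ (i + 1) then (mn : Int) * (s[i]?.getD 0) else 0))
            = (mn : Int) * v * (((rn / mn : Nat) : Int) - ((j / mn : Nat) : Int)) := by
          have hd : rn = j + (rn - j) := by omega
          rw [hd]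
          exact run_sum mn s v j (rn - j) (fun i hi1 hi2 => by
            rcases Nat.eq_or_lt_of_le hi1 with hEq | hLt
            · rw [← hEq]
            · exact h3 i hLt (by omega))
        have hsplit : selSum s mn j
            = (∑ i ∈ Finset.Ico j rn, (if mn ∣ (i + 1) then (mn : Int) * (s[i]?.getD 0) else 0))
              + selSum s mn rn := by
          unfold selSum
          rw [Finset.sum_Ico_consecutive _ (by omega : j ≤ rn) h2]
        rw [hsplit, hrun]
        ring
      · rw [solutionLoopB, if_neg (by exact_mod_cast hc), selSum_empty s mn j (by omega)]
        ring

-- ===== VERDICT (by name: the statement is the Claim_ definition above) =====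
theorem solution_spec : Claim_equal_solution := by
  intro k m score _ hpre
  replace hpre : 1 ≤ m := hpre
  unfold Spec_solution solution solution_alt
  obtain ⟨mn, rfl, hm1⟩ : ∃ mn : Nat, m = (mn : Int) ∧ 1 ≤ mn := ⟨m.toNat, by omega, by omega⟩
  set s := PySem.List.sorted score (fun x : Int => x) true with hs
  change solutionLoopA s (mn : Int) (s.length + 1) ((mn : Int) - 1) 0
    = solutionLoopB s (mn : Int) (s.length + 1) ((0 : Nat) : Int) 0
  have hstart : ((mn : Int)) - 1 = ((mn - 1 : Nat) : Int) := by omega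
  rw [hstart,
    loopA_eq s mn hm1 (s.length + 1) (mn - 1) 0 ⟨1, by omega⟩ (by omega),
    loopB_eq s mn hm1 (s.length + 1) 0 0 (by omega), zero_add, zero_add]
  -- positions 0 .. mn-2 are never selected, so the two starting points agree
  have hzero : ∀ a b : Nat, b ≤ mn - 1 → (∑ i ∈ Finset.Ico a b,
      (if mn ∣ (i + 1) then (mn : Int) * (s[i]?.getD 0) else 0)) = 0 := by
    intro a b hb
    apply Finset.sum_eq_zero
    intro i hi
    simp only [Finset.mem_Ico] at hi
    rw [if_neg]
    intro h
    obtain ⟨c, hc⟩ := h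
    rcases Nat.eq_zero_or_pos c with h0 | h0
    · subst h0
      simp at hc
    · have : mn * 1 ≤ mn * c := Nat.mul_le_mul_left _ h0
      omega
  unfold selSum
  rcases Nat.lt_or_ge s.length (mn - 1) with hlt | hle
  · rw [Finset.Ico_eq_empty (by simpa using (by omega : s.length ≤ mn - 1)),
      hzero 0 s.length (by omega)]
    rfl
  · rw [← Finset.sum_Ico_consecutive _ (Nat.zero_le (mn - 1)) hle,
      hzero 0 (mn - 1) (le_refl _), zero_add]
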